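-- pv_equiv track=rewrite | github.com/SowmiyaShivakumar/PolicyAI_AI_Powered_Policy_Compliance_Assistant | backend/agents/recommendation_agent.py | _priority_filter
-- ===== SOURCE A (Python) =====
-- from typing import Dict, List
--
-- TIER1_POLICIES = [
--     "Information Security Policy",
--     "Access Control Policy",
--     "Personnel Security Policy",
--     "Incident Response Policy",
--     "Computer Security Threat Response Policy",
--     "Identification and Authentication Policy",
--     "Acceptable Use of Information Technology Resource Policy",
--     "Security Awareness and Training Policy",
--     "System and Communications Protection Policy",
--     "Information Classification Standard",
--     "Cyber Incident Response Standard",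
--     "Contingency Planning Policy",
-- ]
--
-- TIER2_POLICIES = [
--     "Vulnerability Scanning Standard",
--     "Security Logging Standard",
--     "Auditing and Accountability Standard",
--     "System and Information Integrity Policy",
--     "Secure Coding Standard",
--     "Patch Management Standard",
--     "Remote Access Standard",
-- ]
--
-- def _priority_filter(policy_names: List[str], max_count: int = 3) -> List[str]:
--     """
--     Return top policies with Tier 1 prioritised over Tier 2.
--     Never return a Tier 2 policy if a Tier 1 one is available.
--     """
--     tier1 = [p for p in policy_names if p in TIER1_POLICIES]
--     tier2 = [p for p in policy_names if p in TIER2_POLICIES]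
--     other = [p for p in policy_names if p not in TIER1_POLICIES
--              and p not in TIER2_POLICIES]
--
--     # Prefer: other (org-specific) > tier1 > tier2
--     ordered = list(dict.fromkeys(other + tier1 + tier2))
--
--     # If we have tier1, never include tier2
--     if tier1:
--         ordered = [p for p in ordered if p not in TIER2_POLICIES]
--
--     return ordered[:max_count]
-- ===== SOURCE B (Python) =====
-- TIER1_POLICIES = [
--     "Information Security Policy",
--     "Access Control Policy",
--     "Personnel Security Policy",
--     "Incident Response Policy",
--     "Computer Security Threat Response Policy",
--     "Identification and Authentication Policy",
--     "Acceptable Use of Information Technology Resource Policy",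
--     "Security Awareness and Training Policy",
--     "System and Communications Protection Policy",
--     "Information Classification Standard",
--     "Cyber Incident Response Standard",
--     "Contingency Planning Policy",
-- ]
--
-- TIER2_POLICIES = [
--     "Vulnerability Scanning Standard",
--     "Security Logging Standard",
--     "Auditing and Accountability Standard",
--     "System and Information Integrity Policy",
--     "Secure Coding Standard",
--     "Patch Management Standard",
--     "Remote Access Standard",
-- ]
--
-- def _priority_filter(policy_names, max_count=3):
--     """Single pass: dedup with a seen-set while classifying into three
--     ordered buckets; then pick other+tier1 if any tier1, else other+tier2."""
--     seen = set()
--     other, tier1, tier2 = [], [], []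
--     for p in policy_names:
--         if p in seen:
--             continue
--         seen.add(p)
--         if p in TIER1_POLICIES:
--             tier1.append(p)
--         elif p in TIER2_POLICIES:
--             tier2.append(p)
--         else:
--             other.append(p)
--     ordered = other + tier1 if tier1 else other + tier2
--     return ordered[:max_count]
-- ===== Notes on version B (the rewrite author's own statement) =====
-- stated objective: simpler
-- what changed: Replaces A's three membership comprehensions, dict.fromkeys dedup of their concatenation, and a conditional tier2-removal filter pass with a single traversal that dedups via a seen-set while classifying each name into one of three ordered buckets, then concatenates other+tier1 or other+tier2.
import Mathlib
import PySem

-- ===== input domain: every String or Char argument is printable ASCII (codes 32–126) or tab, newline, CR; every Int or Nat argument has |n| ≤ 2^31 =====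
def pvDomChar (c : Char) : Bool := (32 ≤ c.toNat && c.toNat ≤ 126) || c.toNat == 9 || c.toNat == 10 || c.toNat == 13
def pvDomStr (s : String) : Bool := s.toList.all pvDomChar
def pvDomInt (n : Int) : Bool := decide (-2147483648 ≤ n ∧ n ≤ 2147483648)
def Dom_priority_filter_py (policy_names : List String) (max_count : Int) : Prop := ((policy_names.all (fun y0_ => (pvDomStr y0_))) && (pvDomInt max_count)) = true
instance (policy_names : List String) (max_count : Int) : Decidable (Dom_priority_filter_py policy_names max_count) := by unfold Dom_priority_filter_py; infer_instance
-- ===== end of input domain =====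

-- B changes A's three comprehensions + dict.fromkeys dedup + conditional filter pass
-- into one classifying pass with a seen-set and three buckets (objective: simpler).

def TIER1_POLICIES : List String := [
  "Information Security Policy",
  "Access Control Policy",
  "Personnel Security Policy",
  "Incident Response Policy",
  "Computer Security Threat Response Policy",
  "Identification and Authentication Policy",
  "Acceptable Use of Information Technology Resource Policy",
  "Security Awareness and Training Policy",
  "System and Communications Protection Policy",
  "Information Classification Standard",
  "Cyber Incident Response Standard",
  "Contingency Planning Policy"]

def TIER2_POLICIES : List String := [
  "Vulnerability Scanning Standard",
  "Security Logging Standard",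
  "Auditing and Accountability Standard",
  "System and Information Integrity Policy",
  "Secure Coding Standard",
  "Patch Management Standard",
  "Remote Access Standard"]

-- ===== PORT A =====
def priority_filter_py (policy_names : List String) (max_count : Int) : List String :=
  let tier1 := policy_names.filter (fun p => TIER1_POLICIES.contains p)
  let tier2 := policy_names.filter (fun p => TIER2_POLICIES.contains p)
  let other := policy_names.filter
    (fun p => !TIER1_POLICIES.contains p && !TIER2_POLICIES.contains p)
  let ordered := PySem.List.dedup (other ++ tier1 ++ tier2)   -- list(dict.fromkeys(...))
  let ordered := if tier1.isEmpty then ordered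
                 else ordered.filter (fun p => !TIER2_POLICIES.contains p)
  PySem.List.slice ordered none (some max_count)              -- ordered[:max_count]

-- ===== PORT B =====
-- the single classifying loop of Source B, carrying (seen, other, tier1, tier2)
def pvAltLoop : List String → PySem.Set String → List String → List String → List String →
    List String × List String × List String
  | [], _, other, tier1, tier2 => (other, tier1, tier2)
  | p :: rest, seen, other, tier1, tier2 =>
    if PySem.Set.contains seen p then pvAltLoop rest seen other tier1 tier2
    else
      let seen := PySem.Set.add seen p
      if TIER1_POLICIES.contains p then pvAltLoop rest seen other (tier1 ++ [p]) tier2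
      else if TIER2_POLICIES.contains p then pvAltLoop rest seen other tier1 (tier2 ++ [p])
      else pvAltLoop rest seen (other ++ [p]) tier1 tier2

def priority_filter_py_alt (policy_names : List String) (max_count : Int) : List String :=
  let (other, tier1, tier2) := pvAltLoop policy_names PySem.Set.empty [] [] []
  let ordered := if tier1.isEmpty then other ++ tier2 else other ++ tier1
  PySem.List.slice ordered none (some max_count)              -- ordered[:max_count]

-- ===== PRECONDITION & SPEC =====
def Spec_priority_filter_py (policy_names : List String) (max_count : Int) (out : List String) : Prop := out = priority_filter_py_alt policy_names max_count
instance (policy_names : List String) (max_count : Int) (out : List String) : Decidable (Spec_priority_filter_py policy_names max_count out) := by unfold Spec_priority_filter_py; infer_instance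

-- ===== CLAIM (what is proved, stated in full; the proofs are below) =====
def Claim_equal_priority_filter_py : Prop := ∀ (policy_names : List String) (max_count : Int), Dom_priority_filter_py policy_names max_count → Spec_priority_filter_py policy_names max_count (priority_filter_py policy_names max_count)

-- ===== LEMMAS AND PROOFS =====

-- the elements a dict.fromkeys-style pass appends when started with `seen`
def newElems (seen : List String) : List String → List String
  | [] => []
  | x :: xs => if x ∈ seen then newElems seen xs else x :: newElems (seen ++ [x]) xs

theorem newElems_congr {seen seen' : List String} : ∀ {l : List String},
    (∀ y ∈ l, (y ∈ seen ↔ y ∈ seen')) → newElems seen l = newElems seen' l := by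
  intro l
  induction l generalizing seen seen' with
  | nil => intro _; rfl
  | cons x xs ih =>
    intro h
    have hiff := h x (by simp)
    by_cases hc : x ∈ seen
    · rw [newElems, newElems, if_pos hc, if_pos (hiff.mp hc)]
      exact ih (fun y hy => h y (by simp [hy]))
    · rw [newElems, newElems, if_neg hc, if_neg (fun hm => hc (hiff.mpr hm))]
      exact congrArg (x :: ·) (ih (fun y hy => by
        have := h y (by simp [hy])
        simp only [List.mem_append, List.mem_singleton]
        tauto))

theorem mem_newElems {x : String} : ∀ {seen l : List String}, x ∈ newElems seen l → x ∈ l := by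
  intro seen l
  induction l generalizing seen with
  | nil => simp [newElems]
  | cons y ys ih =>
    simp only [newElems]
    split
    · intro h; exact List.mem_cons_of_mem _ (ih h)
    · intro h
      rcases List.mem_cons.mp h with h | h
      · simp [h]
      · exact List.mem_cons_of_mem _ (ih h)

theorem newElems_append (seen l1 l2 : List String) :
    newElems seen (l1 ++ l2) = newElems seen l1 ++ newElems (seen ++ l1) l2 := by
  induction l1 generalizing seen with
  | nil => simp [newElems]
  | cons x xs ih =>
    by_cases hc : x ∈ seen
    · rw [List.cons_append, newElems, newElems, if_pos hc, if_pos hc, ih]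
      congr 1
      refine newElems_congr (fun y _ => ?_)
      simp only [List.mem_append, List.mem_cons]
      constructor <;> intro hy <;> rcases hy with h | h
      · exact Or.inl h
      · exact Or.inr (Or.inr h)
      · exact Or.inl h
      · rcases h with h | h
        · exact Or.inl (h ▸ hc)
        · exact Or.inr h
    · rw [List.cons_append, newElems, newElems, if_neg hc, if_neg hc, ih, List.cons_append]
      simp [List.append_assoc]

theorem foldl_add_eq_newElems : ∀ (l seen : List String),
    l.foldl PySem.Set.add seen = seen ++ newElems seen l := by
  intro l
  induction l with
  | nil => intro seen; simp [newElems]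
  | cons x xs ih =>
    intro seen
    by_cases hc : x ∈ seen
    · simp [PySem.Set.add, hc, newElems, ih]
    · simp [PySem.Set.add, hc, newElems, ih (seen ++ [x])]

theorem dedup_eq_newElems (l : List String) : PySem.List.dedup l = newElems [] l := by
  have h : PySem.List.dedup l = l.foldl PySem.Set.add [] := by
    simp [PySem.List.dedup_eq_ofList, PySem.Set.ofList_eq_foldl]
  rw [h, foldl_add_eq_newElems]; simp

-- TIER1 and TIER2 are disjoint
theorem tiers_disjoint {s : String} (h : TIER1_POLICIES.contains s = true) :
    TIER2_POLICIES.contains s = false := by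
  have hall : TIER1_POLICIES.all (fun y => !TIER2_POLICIES.contains y) = true := by decide
  have hs : s ∈ TIER1_POLICIES := by simpa using h
  have := List.all_eq_true.mp hall s hs
  simpa using this

-- processing a head already seen leaves every bucket's newElems unchanged
theorem newElems_filter_skip (p : String → Bool) (seen : List String) (x : String)
    (rest : List String) (hx : x ∈ seen) :
    newElems seen (List.filter p (x :: rest)) = newElems seen (List.filter p rest) := by
  rw [List.filter_cons]; split <;> simp [newElems, hx]

-- processing an unseen head of this bucket appends it
theorem newElems_filter_take (p : String → Bool) (seen : List String) (x : String)
    (rest : List String) (hp : p x = true) (hx : x ∉ seen) :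
    newElems seen (List.filter p (x :: rest)) = x :: newElems (seen ++ [x]) (List.filter p rest) := by
  rw [List.filter_cons, if_pos hp, newElems, if_neg hx]

-- adding a head of another bucket to `seen` does not affect this bucket
theorem newElems_seen_snoc (p : String → Bool) (seen : List String) (x : String)
    (l : List String) (hp : p x = false) :
    newElems (seen ++ [x]) (List.filter p l) = newElems seen (List.filter p l) := by
  refine newElems_congr (fun y hy => ?_)
  have hpy : p y = true := List.of_mem_filter hy
  have hyx : y ≠ x := fun he => by rw [he, hp] at hpy; exact Bool.false_ne_true hpy
  simp [List.mem_append, hyx]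

-- a head of another bucket is dropped by this bucket's filter and harmless in `seen`
theorem newElems_filter_other (p : String → Bool) (seen : List String) (x : String)
    (rest : List String) (hp : p x = false) :
    newElems seen (List.filter p (x :: rest)) = newElems (seen ++ [x]) (List.filter p rest) := by
  rw [List.filter_cons, if_neg (by simp [hp]), newElems_seen_snoc p seen x rest hp]

-- characterisation of B's loop in terms of newElems over A's three filtered lists
theorem pvAltLoop_eq : ∀ (xs : List String) (seen other tier1 tier2 : List String),
    pvAltLoop xs seen other tier1 tier2 =
      (other ++ newElems seen (xs.filter (fun p => !TIER1_POLICIES.contains p && !TIER2_POLICIES.contains p)),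
       tier1 ++ newElems seen (xs.filter (fun p => TIER1_POLICIES.contains p)),
       tier2 ++ newElems seen (xs.filter (fun p => TIER2_POLICIES.contains p))) := by
  intro xs
  induction xs with
  | nil => intro seen o t1 t2; simp [pvAltLoop, newElems]
  | cons x rest ih =>
    intro seen o t1 t2
    rw [pvAltLoop]
    by_cases hseen : x ∈ seen
    · rw [if_pos (by simp [PySem.Set.contains, hseen]), ih,
        newElems_filter_skip _ _ _ _ hseen, newElems_filter_skip _ _ _ _ hseen,
        newElems_filter_skip _ _ _ _ hseen]
    · rw [if_neg (by simp [PySem.Set.contains, hseen])]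
      have hadd : PySem.Set.add seen x = seen ++ [x] := by simp [PySem.Set.add, hseen]
      by_cases h1 : TIER1_POLICIES.contains x = true
      · have h2 : TIER2_POLICIES.contains x = false := tiers_disjoint h1
        rw [if_pos h1, ih, hadd,
          newElems_filter_other _ seen x rest
            (by rw [h1]; simp only [Bool.not_true, Bool.false_and]),
          newElems_filter_take _ seen x rest h1 hseen,
          newElems_filter_other _ seen x rest h2]
        simp only [List.append_assoc, List.singleton_append]
      · have h1f : TIER1_POLICIES.contains x = false := Bool.not_eq_true _ ▸ Bool.eq_false_iff.mpr h1
        by_cases h2 : TIER2_POLICIES.contains x = true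
        · rw [if_neg h1, if_pos h2, ih, hadd,
            newElems_filter_other _ seen x rest
              (by rw [h2]; simp only [Bool.not_true, Bool.and_false]),
            newElems_filter_other (fun p => TIER1_POLICIES.contains p) seen x rest h1f,
            newElems_filter_take _ seen x rest h2 hseen]
          simp only [List.append_assoc, List.singleton_append]
        · have h2f : TIER2_POLICIES.contains x = false := Bool.not_eq_true _ ▸ Bool.eq_false_iff.mpr h2
          rw [if_neg h1, if_neg h2, ih, hadd,
            newElems_filter_take _ seen x rest (by rw [h1f, h2f]; rfl) hseen,
            newElems_filter_other (fun p => TIER1_POLICIES.contains p) seen x rest h1f,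
            newElems_filter_other (fun p => TIER2_POLICIES.contains p) seen x rest h2f]
          simp only [List.append_assoc, List.singleton_append]

-- ===== VERDICT (by name: the statement is the Claim_ definition above) =====
theorem priority_filter_py_spec : Claim_equal_priority_filter_py := by
  intro ns m _
  unfold Spec_priority_filter_py priority_filter_py priority_filter_py_alt
  rw [pvAltLoop_eq]
  simp only [List.nil_append]
  set pO : String → Bool := fun p => !TIER1_POLICIES.contains p && !TIER2_POLICIES.contains p with hpO
  set p1 : String → Bool := fun p => TIER1_POLICIES.contains p with hp1
  set p2 : String → Bool := fun p => TIER2_POLICIES.contains p with hp2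
  set other := ns.filter pO with hother
  set tier1 := ns.filter p1 with htier1
  set tier2 := ns.filter p2 with htier2
  have hOm : ∀ y ∈ other, pO y = true := fun y hy => List.of_mem_filter hy
  have h1m : ∀ y ∈ tier1, p1 y = true := fun y hy => List.of_mem_filter hy
  have h2m : ∀ y ∈ tier2, p2 y = true := fun y hy => List.of_mem_filter hy
  -- split the global dedup into three independent dedups
  have hsplit : PySem.List.dedup (other ++ tier1 ++ tier2) =
      newElems [] other ++ newElems [] tier1 ++ newElems [] tier2 := by
    rw [dedup_eq_newElems, newElems_append, newElems_append]
    congr 1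
    · congr 1
      refine newElems_congr (fun y hy => ?_)
      have hy1 : p1 y = true := h1m y hy
      have hyo : y ∉ other := fun hmem => by
        have h := hOm y hmem
        rw [hpO] at h; rw [hp1] at hy1
        simp only [hy1, Bool.not_true, Bool.false_and] at h
        exact Bool.false_ne_true h
      simp [hyo]
    · refine newElems_congr (fun y hy => ?_)
      have hy2 : p2 y = true := h2m y hy
      have hy2' : TIER2_POLICIES.contains y = true := by rw [hp2] at hy2; exact hy2
      have hno : ¬ p1 y = true := fun h => by
        have := tiers_disjoint (by rw [hp1] at h; exact h)
        rw [this] at hy2'; exact Bool.false_ne_true hy2'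
      have hO : y ∉ other := fun hmem => by
        have h := hOm y hmem
        rw [hpO] at h
        simp only [hy2', Bool.not_true, Bool.and_false] at h
        exact Bool.false_ne_true h
      have h1 : y ∉ tier1 := fun hmem => hno (h1m y hmem)
      simp [List.mem_append, hO, h1]
  rw [hsplit]
  have hemp : tier1.isEmpty = (newElems [] tier1).isEmpty := by
    rcases htl : tier1 with _ | ⟨a, l⟩ <;> simp [newElems]
  by_cases ht : tier1.isEmpty = true
  · -- tier1 empty: A keeps the dedup unfiltered; its tier1 block is empty
    have h1nil : tier1 = [] := List.isEmpty_iff.mp ht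
    rw [if_pos ht, if_pos (hemp ▸ ht)]
    rw [h1nil]
    simp [newElems, PySem.Set.empty]
  · -- tier1 nonempty: A filters TIER2 members out of the dedup
    rw [if_neg ht, if_neg (hemp ▸ ht)]
    congr 1
    rw [List.filter_append, List.filter_append]
    have hfO : (newElems [] other).filter (fun p => !TIER2_POLICIES.contains p) = newElems [] other := by
      refine List.filter_eq_self.mpr (fun y hy => ?_)
      have h := hOm y (mem_newElems hy)
      rw [hpO] at h
      exact (Bool.and_eq_true _ _).mp h |>.2
    have hf1 : (newElems [] tier1).filter (fun p => !TIER2_POLICIES.contains p) = newElems [] tier1 := by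
      refine List.filter_eq_self.mpr (fun y hy => ?_)
      have h := tiers_disjoint (by rw [hp1] at h1m; exact h1m y (mem_newElems hy))
      simp only [h, Bool.not_false]
    have hf2 : (newElems [] tier2).filter (fun p => !TIER2_POLICIES.contains p) = [] := by
      refine List.filter_eq_nil_iff.mpr (fun y hy => ?_)
      have h := h2m y (mem_newElems hy)
      rw [hp2] at h
      simp only [h, Bool.not_true]
      exact Bool.false_ne_true
    rw [hfO, hf1, hf2, List.append_nil]
    rfl
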